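-- pv_equiv track=rewrite | github.com/MateuszLakota/indico-data-exporter | indico_exporter/serializers/submission_serializer.py | _squash_rows_if_possible
-- ===== SOURCE A (Python) =====
-- from typing import Dict, Any, List
--
-- def _squash_rows_if_possible(rows: List[Dict[str, str]]) -> List[Dict[str, str]]:
--     if len(rows) <= 1:
--         return rows
--
--     merged = rows[0].copy()
--
--     for row in rows[1:]:
--
--         for key, value in row.items():
--
--             if key in ("submission_id", "filename", "create_datetime"):
--                 continue
--
--             existing = merged.get(key, "")
--
--             if not existing and value:
--                 merged[key] = value
--                 continue
--
--             if existing == value: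
--                 continue
--
--             if existing and value and existing != value:
--                 return rows
--
--     return [merged]
-- ===== SOURCE B (Python) =====
-- # B: aggregate-then-build — one pass collects each key's distinct non-empty values,
-- # then a conflict check and a single rebuild replace A's incremental merge/early-return.
-- def _squash_rows_if_possible(rows):
--     if len(rows) <= 1:
--         return rows
--     IGNORED = ("submission_id", "filename", "create_datetime")
--     values = {}
--     for row in rows:
--         for key, value in row.items():
--             if key in IGNORED or not value:
--                 continue
--             seen = values.get(key, [])
--             if value not in seen:
--                 values[key] = seen + [value]
--     if any(len(seen) > 1 for seen in values.values()):
--         return rows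
--     merged = rows[0].copy()
--     for key, seen in values.items():
--         merged[key] = seen[0]
--     return [merged]
-- ===== Notes on version B (the rewrite author's own statement) =====
-- stated objective: alternative
-- what changed: B replaces A's incremental merge with mid-scan early return by an aggregate-then-build pass: it first collects each non-ignored key's distinct non-empty values over all rows, returns the rows unchanged if any key collected two values, and otherwise rebuilds rows[0] once from the collected values; Pre_ excludes rows whose association list carries duplicate keys, which cannot arise from a Python dict.
import Mathlib
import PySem

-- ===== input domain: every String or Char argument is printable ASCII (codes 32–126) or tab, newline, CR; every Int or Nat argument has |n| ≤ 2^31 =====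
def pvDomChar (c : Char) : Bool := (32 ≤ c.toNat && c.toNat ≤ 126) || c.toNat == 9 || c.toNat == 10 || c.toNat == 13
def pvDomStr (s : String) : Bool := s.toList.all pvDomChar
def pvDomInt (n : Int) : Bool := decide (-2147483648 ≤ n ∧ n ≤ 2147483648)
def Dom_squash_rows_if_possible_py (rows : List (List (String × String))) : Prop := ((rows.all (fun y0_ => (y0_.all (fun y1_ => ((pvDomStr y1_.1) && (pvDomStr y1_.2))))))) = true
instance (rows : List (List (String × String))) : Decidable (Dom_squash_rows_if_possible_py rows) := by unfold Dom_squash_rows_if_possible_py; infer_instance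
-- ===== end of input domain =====

-- B aggregates each key's distinct non-empty values in one pass, then checks for a conflict and rebuilds rows[0] once (alternative decomposition, same cost).

-- ===== PORT A =====
-- the three keys both programs ignore
def pvIgn (k : String) : Bool := k == "submission_id" || k == "filename" || k == "create_datetime"

-- A's inner-loop body on one (key, value) pair; `none` models A's early `return rows`
def pvStepA (acc : Option (PySem.Dict String String)) (kv : String × String) :
    Option (PySem.Dict String String) :=
  match acc with
  | none => none
  | some m =>
    if pvIgn kv.1 then some m
    else
      let existing := m.getD kv.1 ""
      if existing == "" && kv.2 != "" then some (m.insert kv.1 kv.2)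
      else if existing == kv.2 then some m
      else if existing != "" && kv.2 != "" && existing != kv.2 then none
      else some m

def squash_rows_if_possible_py (rows : List (List (String × String))) :
    List (List (String × String)) :=
  if rows.length ≤ 1 then rows
  else
    match rows with
    | [] => rows
    | r0 :: rest =>
      match rest.foldl (fun acc row => row.foldl pvStepA acc) (some (PySem.Dict.mk r0)) with
      | none => rows
      | some merged => [merged.items]

-- ===== PORT B =====
-- B's inner-loop body: record kv.2 among the distinct non-empty values seen for kv.1
def pvAggStep (vals : PySem.Dict String (List String)) (kv : String × String) :
    PySem.Dict String (List String) :=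
  if pvIgn kv.1 || kv.2 == "" then vals
  else
    let seen := vals.getD kv.1 []
    if kv.2 ∈ seen then vals else vals.insert kv.1 (seen ++ [kv.2])

def squash_rows_if_possible_py_alt (rows : List (List (String × String))) :
    List (List (String × String)) :=
  if rows.length ≤ 1 then rows
  else
    let values := rows.foldl (fun vals row => row.foldl pvAggStep vals) PySem.Dict.empty
    if values.items.any (fun p => 1 < p.2.length) then rows
    else
      match rows with
      | [] => rows
      | r0 :: _ =>
        -- seen[0]: each collected list is nonempty by construction, ported as headD ""
        [(values.items.foldl (fun m p => m.insert p.1 (p.2.headD "")) (PySem.Dict.mk r0)).items]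

-- ===== PRECONDITION & SPEC =====
-- Pre_ restricts each row's association list to pairwise-distinct keys: a row stands for a
-- Python dict, which cannot hold duplicate keys, so lists with duplicates match no Python input.
def Pre_squash_rows_if_possible_py (rows : List (List (String × String))) : Prop :=
  ∀ row ∈ rows, (row.map Prod.fst).Nodup
instance (rows : List (List (String × String))) : Decidable (Pre_squash_rows_if_possible_py rows) := by
  unfold Pre_squash_rows_if_possible_py; infer_instance

def pvWitness_squash_rows_if_possible_py : (List (List (String × String))) :=
  [[("a", "1"), ("submission_id", "7")], [("a", "1"), ("b", "2")]]

def Spec_squash_rows_if_possible_py (rows : List (List (String × String))) (out : List (List (String × String))) : Prop := out = squash_rows_if_possible_py_alt rows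
instance (rows : List (List (String × String))) (out : List (List (String × String))) : Decidable (Spec_squash_rows_if_possible_py rows out) := by unfold Spec_squash_rows_if_possible_py; infer_instance

-- ===== CLAIM (what is proved, stated in full; the proofs are below) =====
def Claim_equal_squash_rows_if_possible_py : Prop := ∀ (rows : List (List (String × String))), Dom_squash_rows_if_possible_py rows → Pre_squash_rows_if_possible_py rows → Spec_squash_rows_if_possible_py rows (squash_rows_if_possible_py rows)


-- ===== LEMMAS AND PROOFS =====

-- abbreviation used only by the proofs: B's rebuild of rows[0] from the aggregation dict
def pvBuild (r0 : List (String × String)) (vals : PySem.Dict String (List String)) :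
    PySem.Dict String String :=
  vals.items.foldl (fun m p => m.insert p.1 (p.2.headD "")) (PySem.Dict.mk r0)

-- B's conflict test
def pvConf (vals : PySem.Dict String (List String)) : Bool :=
  vals.items.any (fun p => 1 < p.2.length)

-- the loop invariant tying A's running merge `m` to B's aggregation dict `vals`
def pvInv (r0 : List (String × String)) (vals : PySem.Dict String (List String))
    (m : PySem.Dict String String) : Prop :=
  (∀ p ∈ vals.items, pvIgn p.1 = false ∧ p.2.length = 1 ∧ "" ∉ p.2) ∧
  vals.keys.Nodup ∧ m.keys.Nodup ∧
  (∀ k, pvIgn k = false → m.getD k "" = (vals.getD k []).headD "") ∧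
  pvBuild r0 vals = m

theorem pvStepA_foldl_none (ps : List (String × String)) : ps.foldl pvStepA none = none := by
  induction ps with
  | nil => rfl
  | cons p ps ih => simpa [pvStepA] using ih

theorem pv_foldl_nested {α β : Type} (f : β → α → β) (rows : List (List α)) (init : β) :
    rows.foldl (fun s row => row.foldl f s) init = rows.flatten.foldl f init := by
  induction rows generalizing init with
  | nil => rfl
  | cons r rows ih => simp [List.foldl_append, ih]

theorem pv_assoc_unique {ν : Type} (l : List (String × ν)) (h : (l.map Prod.fst).Nodup)
    {k : String} {v v' : ν} (h1 : (k, v) ∈ l) (h2 : (k, v') ∈ l) : v = v' := by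
  have hk : (PySem.Dict.mk l).keys.Nodup := by simpa [PySem.Dict.keys_mk] using h
  have e1 : (PySem.Dict.mk l).get? k = some v :=
    ((PySem.Dict.get?_eq_some_iff_mem_items _ k v hk).2 h1)
  have e2 : (PySem.Dict.mk l).get? k = some v' :=
    ((PySem.Dict.get?_eq_some_iff_mem_items _ k v' hk).2 h2)
  rw [e1] at e2; exact Option.some.inj e2

theorem pv_insert_noop {ν : Type} (m : PySem.Dict String ν) (k : String) (v : ν)
    (hnd : m.keys.Nodup) (h : m.get? k = some v) : m.insert k v = m := by
  apply PySem.Dict.ext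
  have hc : m.contains k = true := by
    rw [PySem.Dict.contains_eq_isSome_get?, h]; rfl
  rw [PySem.Dict.items_insert_of_contains m v hc]
  have hcongr : ∀ p ∈ m.items, (fun p => if (p.1 == k) = true then (k, v) else p) p = id p := by
    intro p hp
    by_cases hpk : (p.1 == k) = true
    · have hk1 : p.1 = k := by simpa using hpk
      have hmem : (k, p.2) ∈ m.items := by
        have he : p = (p.1, p.2) := rfl
        rw [hk1] at he
        rw [← he]; exact hp
      have h2 : m.get? k = some p.2 := (PySem.Dict.get?_eq_some_iff_mem_items _ _ _ hnd).2 hmem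
      rw [h] at h2
      have hv : v = p.2 := Option.some.inj h2
      simp only [if_pos hpk]
      rw [hv, ← hk1]
      rfl
    · simp [hpk]
  rw [List.map_congr_left hcongr, List.map_id]

theorem pv_foldl_insert_noop {m : PySem.Dict String String} (L : List (String × List String))
    (hnd : m.keys.Nodup) (h : ∀ p ∈ L, m.get? p.1 = some (p.2.headD "")) :
    L.foldl (fun m p => m.insert p.1 (p.2.headD "")) m = m := by
  induction L with
  | nil => rfl
  | cons p L ih =>
    have := pv_insert_noop m p.1 (p.2.headD "") hnd (h p (by simp))
    simp only [List.foldl_cons, this]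
    exact ih fun q hq => h q (by simp [hq])

-- the aggregation of a single row with fresh, pairwise-distinct keys
theorem pv_agg_row_items (r : List (String × String)) (vals : PySem.Dict String (List String))
    (hnd : vals.keys.Nodup) (hfresh : ∀ p ∈ r, vals.contains p.1 = false)
    (hrn : (r.map Prod.fst).Nodup) :
    (r.foldl pvAggStep vals).items =
      vals.items ++ (r.filter (fun p => !pvIgn p.1 && p.2 != "")).map (fun p => (p.1, [p.2])) := by
  induction r generalizing vals with
  | nil => simp
  | cons q r ih =>
    rcases q with ⟨k, v⟩
    by_cases hskip : (pvIgn k || v == "") = true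
    · have hstep : pvAggStep vals (k, v) = vals := by simp [pvAggStep, hskip]
      have hfilter : (!pvIgn k && v != "") = false := by
        rcases Bool.or_eq_true_iff.1 hskip with h | h
        · simp [h]
        · have hv0 : v = "" := by simpa using h
          simp [hv0]
      have htl : (r.map Prod.fst).Nodup := (List.nodup_cons.1 (by simpa using hrn)).2
      simp only [List.foldl_cons, hstep]
      rw [ih vals hnd (fun p hp => hfresh p (by simp [hp])) htl]
      simp [hfilter]
    · have hign : pvIgn k = false := by
        cases hig : pvIgn k
        · rfl
        · exact absurd (by simp [hig]) hskip
      have hv : ¬ v = "" := by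
        intro hv; exact hskip (by simp [hv])
      have hc : vals.contains k = false := hfresh (k, v) (by simp)
      have hstep : pvAggStep vals (k, v) = vals.insert k [v] := by
        simp [pvAggStep, hign, hv, PySem.Dict.getD_of_not_contains vals [] hc]
      have hitems := PySem.Dict.items_insert_of_not_contains vals [v] hc
      have hnd' : (vals.insert k [v]).keys.Nodup := PySem.Dict.nodup_keys_insert _ _ _ hnd
      have hfresh' : ∀ p ∈ r, (vals.insert k [v]).contains p.1 = false := by
        intro p hp
        rw [PySem.Dict.contains_insert]
        have hne : ¬ p.1 = k := by
          intro he
          have : k ∈ r.map Prod.fst := List.mem_map.2 ⟨p, hp, he⟩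
          exact (List.nodup_cons.1 (by simpa using hrn)).1 this
        simp [hne, hfresh p (by simp [hp])]
      simp only [List.foldl_cons, hstep]
      rw [ih (vals.insert k [v]) hnd' hfresh' (List.nodup_cons.1 (by simpa using hrn)).2]
      simp [hitems, hign, hv]

-- the invariant holds after aggregating rows[0] from the empty dict, with merged = rows[0]
theorem pv_inv_init (r0 : List (String × String)) (h : (r0.map Prod.fst).Nodup) :
    pvInv r0 (r0.foldl pvAggStep PySem.Dict.empty) (PySem.Dict.mk r0) := by
  have hempty : (PySem.Dict.empty : PySem.Dict String (List String)).items = [] := rfl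
  have hitems : (r0.foldl pvAggStep PySem.Dict.empty).items =
      (r0.filter (fun p => !pvIgn p.1 && p.2 != "")).map (fun p => (p.1, [p.2])) := by
    rw [pv_agg_row_items r0 PySem.Dict.empty (by simp [PySem.Dict.keys, hempty])
      (fun p _ => PySem.Dict.contains_empty p.1) h, hempty]
    simp
  have hmkkeys : (PySem.Dict.mk r0).keys.Nodup := by simpa [PySem.Dict.keys_mk] using h
  have hkeys : (r0.foldl pvAggStep PySem.Dict.empty).keys =
      ((r0.filter (fun p => !pvIgn p.1 && p.2 != "")).map Prod.fst) := by
    simp [PySem.Dict.keys, hitems, Function.comp]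
  have hndagg : (r0.foldl pvAggStep PySem.Dict.empty).keys.Nodup := by
    rw [hkeys]
    exact ((r0.filter_sublist).map Prod.fst).nodup h
  refine ⟨?_, hndagg, hmkkeys, ?_, ?_⟩
  · intro p hp
    rw [hitems] at hp
    rcases List.mem_map.1 hp with ⟨q, hq, rfl⟩
    have := List.of_mem_filter hq
    have hv : ¬ q.2 = "" := by
      intro he; simp [he] at this
    refine ⟨?_, rfl, by simp [hv]⟩
    cases hig : pvIgn q.1
    · rfl
    · simp [hig] at this
  · intro k hign
    by_cases hk : ∃ v, (k, v) ∈ r0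
    · rcases hk with ⟨v, hv⟩
      have hmk : (PySem.Dict.mk r0).getD k "" = v :=
        PySem.Dict.getD_of_mem_items _ (by simpa using hv) hmkkeys ""
      by_cases hve : v = ""
      · -- the only pair with key k has an empty value: k is absent from the aggregation
        have hnc : (r0.foldl pvAggStep PySem.Dict.empty).contains k = false := by
          rw [PySem.Dict.contains_eq_decide_mem_keys, hkeys]
          simp only [decide_eq_false_iff_not]
          intro hmem
          rcases List.mem_map.1 hmem with ⟨q, hq, hqk⟩
          have hq0 := List.of_mem_filter hq
          have hqr := List.mem_filter.1 hq |>.1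
          have hq2 : (q.1, q.2) ∈ r0 := hqr
          rw [hqk] at hq2
          have : q.2 = v := pv_assoc_unique r0 h hq2 hv
          rw [this, hve] at hq0; simp at hq0
        rw [PySem.Dict.getD_of_not_contains _ [] hnc, hmk, hve]; rfl
      · have hmem : (k, [v]) ∈ (r0.foldl pvAggStep PySem.Dict.empty).items := by
          rw [hitems]
          exact List.mem_map.2 ⟨(k, v), List.mem_filter.2 ⟨hv, by simp [hign, hve]⟩, rfl⟩
        rw [PySem.Dict.getD_of_mem_items _ hmem hndagg [], hmk]; rfl
    · push Not at hk
      have hncr : (PySem.Dict.mk r0).contains k = false := by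
        rw [PySem.Dict.contains_eq_decide_mem_keys]
        simp only [decide_eq_false_iff_not, PySem.Dict.keys_mk]
        intro hmem
        rcases List.mem_map.1 hmem with ⟨q, hq, hqk⟩
        have hq2 : (q.1, q.2) ∈ r0 := hq
        rw [hqk] at hq2
        exact hk q.2 hq2
      have hnca : (r0.foldl pvAggStep PySem.Dict.empty).contains k = false := by
        rw [PySem.Dict.contains_eq_decide_mem_keys, hkeys]
        simp only [decide_eq_false_iff_not]
        intro hmem
        rcases List.mem_map.1 hmem with ⟨q, hq, hqk⟩
        have hq2 : (q.1, q.2) ∈ r0 := List.mem_filter.1 hq |>.1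
        rw [hqk] at hq2
        exact hk q.2 hq2
      rw [PySem.Dict.getD_of_not_contains _ [] hnca, PySem.Dict.getD_of_not_contains _ "" hncr]
      rfl
  · unfold pvBuild
    rw [hitems]
    apply pv_foldl_insert_noop _ hmkkeys
    intro p hp
    rcases List.mem_map.1 hp with ⟨q, hq, rfl⟩
    exact (PySem.Dict.get?_eq_some_iff_mem_items _ _ _ hmkkeys).2
      (by simpa using List.mem_filter.1 hq |>.1)

-- one synchronized step of A's merge and B's aggregation
theorem pv_step_inv (r0 : List (String × String)) (vals : PySem.Dict String (List String))
    (m : PySem.Dict String String) (kv : String × String) (h : pvInv r0 vals m) :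
    match pvStepA (some m) kv with
    | some m' => pvInv r0 (pvAggStep vals kv) m'
    | none => (pvAggStep vals kv).keys.Nodup ∧ pvConf (pvAggStep vals kv) = true := by
  obtain ⟨hi, hvnd, hmnd, hrel, hbuild⟩ := h
  rcases kv with ⟨k, v⟩
  by_cases hign : pvIgn k = true
  · have hA : pvStepA (some m) (k, v) = some m := by simp [pvStepA, hign]
    have hB : pvAggStep vals (k, v) = vals := by simp [pvAggStep, hign]
    rw [hA, hB]
    exact ⟨hi, hvnd, hmnd, hrel, hbuild⟩
  · have hign' : pvIgn k = false := by simpa using hign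
    by_cases hv : v = ""
    · -- empty value: both sides skip
      have hA : pvStepA (some m) (k, v) = some m := by
        by_cases hex : m.getD k "" = ""
        · simp [pvStepA, hign', hv, hex]
        · simp [pvStepA, hign', hv, hex]
      have hB : pvAggStep vals (k, v) = vals := by simp [pvAggStep, hv]
      rw [hA, hB]
      exact ⟨hi, hvnd, hmnd, hrel, hbuild⟩
    · have hex := hrel k hign'
      by_cases hc : vals.contains k = true
      · -- key already has a collected value h0
        have hsome : ∃ l, vals.get? k = some l := by
          rw [PySem.Dict.contains_eq_isSome_get?] at hc
          cases hg : vals.get? k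
          · rw [hg] at hc; simp at hc
          · exact ⟨_, rfl⟩
        rcases hsome with ⟨l, hl⟩
        have hlm : (k, l) ∈ vals.items := PySem.Dict.mem_items_of_get?_eq_some _ hl
        rcases hi (k, l) hlm with ⟨_, hlen, hne⟩
        rcases List.length_eq_one_iff.1 hlen with ⟨h0, rfl⟩
        have h0ne : ¬ h0 = "" := by intro he; rw [he] at hne; simp at hne
        have hgd : vals.getD k [] = [h0] := PySem.Dict.getD_of_get?_eq_some _ _ hl
        rw [hgd] at hex
        by_cases hvh : v = h0
        · -- same value: both sides skip
          have hA : pvStepA (some m) (k, v) = some m := by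
            simp [pvStepA, hign', hex, h0ne, hvh]
          have hB : pvAggStep vals (k, v) = vals := by
            simp [pvAggStep, hign', hv, hgd, hvh]
          rw [hA, hB]
          exact ⟨hi, hvnd, hmnd, hrel, hbuild⟩
        · -- distinct second value: A returns rows, B records a length-2 list
          have hA : pvStepA (some m) (k, v) = none := by
            simp only [pvStepA, hign']
            simp [hex, h0ne, hv, hvh, Ne.symm]
          have hB : pvAggStep vals (k, v) = vals.insert k [h0, v] := by
            simp [pvAggStep, hign', hv, hgd, hvh]
          rw [hA, hB]
          refine ⟨PySem.Dict.nodup_keys_insert _ _ _ hvnd, ?_⟩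
          unfold pvConf
          rw [List.any_eq_true]
          exact ⟨(k, [h0, v]), PySem.Dict.mem_items_insert_self _ _ _, by simp⟩
      · -- fresh key with a non-empty value: A inserts it, B starts its list
        have hc' : vals.contains k = false := by simpa using hc
        have hgd : vals.getD k [] = [] := PySem.Dict.getD_of_not_contains _ [] hc'
        rw [hgd] at hex
        have hA : pvStepA (some m) (k, v) = some (m.insert k v) := by
          simp [pvStepA, hign', hex, hv]
        have hB : pvAggStep vals (k, v) = vals.insert k [v] := by
          simp [pvAggStep, hign', hv, hgd]
        rw [hA, hB]
        have hitems := PySem.Dict.items_insert_of_not_contains vals [v] hc'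
        refine ⟨?_, PySem.Dict.nodup_keys_insert _ _ _ hvnd,
          PySem.Dict.nodup_keys_insert _ _ _ hmnd, ?_, ?_⟩
        · intro p hp
          rw [hitems] at hp
          rcases List.mem_append.1 hp with hp | hp
          · exact hi p hp
          · simp at hp
            subst hp
            exact ⟨hign', rfl, by simp [hv]⟩
        · intro k' hign''
          rw [PySem.Dict.getD_insert, PySem.Dict.getD_insert]
          by_cases hk' : k' = k
          · simp [hk']
          · simp [hk', hrel k' hign'']
        · unfold pvBuild
          rw [hitems, List.foldl_append]
          simp only [List.foldl_cons, List.foldl_nil]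
          rw [show vals.items.foldl (fun m p => m.insert p.1 (p.2.headD "")) (PySem.Dict.mk r0)
              = pvBuild r0 vals from rfl, hbuild]
          rfl

-- once B has seen a conflict it stays, whatever else is aggregated
theorem pv_conf_step (vals : PySem.Dict String (List String)) (kv : String × String)
    (hnd : vals.keys.Nodup) (hc : pvConf vals = true) :
    (pvAggStep vals kv).keys.Nodup ∧ pvConf (pvAggStep vals kv) = true := by
  rcases kv with ⟨k, v⟩
  unfold pvAggStep
  by_cases hskip : (pvIgn k || v == "") = true
  · simp [hskip, hnd, hc]
  · simp only [hskip, if_false, Bool.false_eq_true]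
    by_cases hmem : v ∈ vals.getD k []
    · simp [hmem, hnd, hc]
    · simp only [hmem, if_false]
      refine ⟨PySem.Dict.nodup_keys_insert _ _ _ hnd, ?_⟩
      unfold pvConf at hc ⊢
      rw [List.any_eq_true] at hc ⊢
      rcases hc with ⟨p, hp, hlen⟩
      by_cases hpk : p.1 = k
      · have hgd : vals.getD k [] = p.2 := by
          rw [← hpk]
          exact PySem.Dict.getD_of_mem_items _ (by simpa using hp) hnd []
        refine ⟨(k, vals.getD k [] ++ [v]), PySem.Dict.mem_items_insert_self _ _ _, ?_⟩
        simp only [hgd]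
        simp at hlen ⊢
        omega
      · exact ⟨p, (PySem.Dict.mem_items_insert _ _ _ _).2 (Or.inr ⟨hp, hpk⟩), hlen⟩

theorem pv_conf_fold (ps : List (String × String)) (vals : PySem.Dict String (List String))
    (hnd : vals.keys.Nodup) (hc : pvConf vals = true) :
    (ps.foldl pvAggStep vals).keys.Nodup ∧ pvConf (ps.foldl pvAggStep vals) = true := by
  induction ps generalizing vals with
  | nil => exact ⟨hnd, hc⟩
  | cons kv ps ih =>
    rcases pv_conf_step vals kv hnd hc with ⟨hnd', hc'⟩
    simpa using ih (pvAggStep vals kv) hnd' hc'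

-- main synchronization of the two folds over the stream of pairs of rows[1:]
theorem pv_fold_inv (r0 : List (String × String)) (ps : List (String × String))
    (vals : PySem.Dict String (List String)) (m : PySem.Dict String String)
    (h : pvInv r0 vals m) :
    match ps.foldl pvStepA (some m) with
    | some m' => pvInv r0 (ps.foldl pvAggStep vals) m'
    | none => (ps.foldl pvAggStep vals).keys.Nodup ∧ pvConf (ps.foldl pvAggStep vals) = true := by
  induction ps generalizing vals m with
  | nil => exact h
  | cons kv ps ih =>
    have hstep := pv_step_inv r0 vals m kv h
    simp only [List.foldl_cons]
    cases hA : pvStepA (some m) kv with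
    | some m'' =>
      rw [hA] at hstep
      exact ih (pvAggStep vals kv) m'' hstep
    | none =>
      rw [hA] at hstep
      rw [pvStepA_foldl_none]
      exact pv_conf_fold ps (pvAggStep vals kv) hstep.1 hstep.2

theorem pv_conf_false_of_inv {r0 vals m} (h : pvInv r0 vals m) : pvConf vals = false := by
  unfold pvConf
  rw [List.any_eq_false]
  intro p hp
  rcases h.1 p hp with ⟨_, hlen, _⟩
  simp [hlen]

-- ===== VERDICT (by name: the statement is the Claim_ definition above) =====
theorem squash_rows_if_possible_py_spec : Claim_equal_squash_rows_if_possible_py := by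
  intro rows _hdom hpre
  unfold Spec_squash_rows_if_possible_py
  by_cases hlen : rows.length ≤ 1
  · simp [squash_rows_if_possible_py, squash_rows_if_possible_py_alt, hlen]
  · match rows, hlen with
    | r0 :: rest, hlen =>
    have hr0 : (r0.map Prod.fst).Nodup := hpre r0 (by simp)
    have hrewA : rest.foldl (fun acc row => row.foldl pvStepA acc) (some (PySem.Dict.mk r0))
        = rest.flatten.foldl pvStepA (some (PySem.Dict.mk r0)) :=
      pv_foldl_nested pvStepA rest (some (PySem.Dict.mk r0))
    have hrewB : (r0 :: rest).foldl (fun vals row => row.foldl pvAggStep vals) PySem.Dict.empty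
        = rest.flatten.foldl pvAggStep (r0.foldl pvAggStep PySem.Dict.empty) := by
      rw [pv_foldl_nested pvAggStep (r0 :: rest) PySem.Dict.empty]
      simp [List.foldl_append]
    have hinv := pv_fold_inv r0 rest.flatten (r0.foldl pvAggStep PySem.Dict.empty)
      (PySem.Dict.mk r0) (pv_inv_init r0 hr0)
    simp only [squash_rows_if_possible_py, squash_rows_if_possible_py_alt, if_neg hlen, hrewA,
      hrewB]
    cases hA : rest.flatten.foldl pvStepA (some (PySem.Dict.mk r0)) with
    | none =>
      rw [hA] at hinv
      have hc : (rest.flatten.foldl pvAggStep (r0.foldl pvAggStep PySem.Dict.empty)).items.any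
          (fun p => 1 < p.2.length) = true := hinv.2
      simp [hc]
    | some m' =>
      rw [hA] at hinv
      have hc : (rest.flatten.foldl pvAggStep (r0.foldl pvAggStep PySem.Dict.empty)).items.any
          (fun p => 1 < p.2.length) = false := pv_conf_false_of_inv hinv
      simp only [hc]
      have hb := hinv.2.2.2.2
      unfold pvBuild at hb
      rw [hb]
      simp
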